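-- pv_equiv track=rewrite | github.com/WTFox/printers | printers/ricoh.py | _get_tagid
-- ===== SOURCE A (Python) =====
-- def _get_tagid(userid):
--     starting_letter = userid[0].lower()
--     trans_map = dict(
--         AB=2, CD=3, EF=4,
--         GH=5, IJK=6, LMN=7,
--         OPQ=8, RST=9, UVW=10,
--         XYZ=11,
--     )
--
--     for k, v in trans_map.items():
--         if starting_letter in k.lower():
--             return '1,{}'.format(v)
-- ===== SOURCE B (Python) =====
-- # B: one flat letter->tagid table built once from the group list; single dict lookup
-- # replaces A's scan over groups with substring tests. Same IndexError on empty userid.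
-- _GROUPS = [('AB', 2), ('CD', 3), ('EF', 4), ('GH', 5), ('IJK', 6),
--            ('LMN', 7), ('OPQ', 8), ('RST', 9), ('UVW', 10), ('XYZ', 11)]
-- _TABLE = {ch: v for group, v in _GROUPS for ch in group.lower()}
--
--
-- def _get_tagid(userid):
--     val = _TABLE.get(userid[0].lower())
--     if val is None:
--         return None
--     return '1,{}'.format(val)
-- ===== Notes on version B (the rewrite author's own statement) =====
-- stated objective: simpler
-- what changed: B precomputes a flat letter-to-tagid dict from the group table once and does a single direct lookup on the lowered first character, instead of A's per-call scan over the ten groups with a substring membership test each.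
import Mathlib
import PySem

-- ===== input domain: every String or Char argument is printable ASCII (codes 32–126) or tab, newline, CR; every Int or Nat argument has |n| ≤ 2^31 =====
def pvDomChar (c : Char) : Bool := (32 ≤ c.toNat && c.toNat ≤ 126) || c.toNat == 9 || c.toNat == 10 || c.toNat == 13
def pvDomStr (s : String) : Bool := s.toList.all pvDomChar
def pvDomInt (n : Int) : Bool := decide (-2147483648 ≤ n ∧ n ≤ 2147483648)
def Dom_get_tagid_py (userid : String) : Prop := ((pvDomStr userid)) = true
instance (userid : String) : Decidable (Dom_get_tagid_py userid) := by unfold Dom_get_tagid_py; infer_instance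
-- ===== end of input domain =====

-- B replaces A's scan over letter groups (substring test per group) by one flat
-- letter → tagid table built once and a single lookup; objective: simpler.
-- Both raise IndexError on the empty string (excluded by Pre_).

-- ===== PORT A =====
-- the dict literal trans_map, in insertion order
def pvTransMap : List (String × Int) :=
  [("AB", 2), ("CD", 3), ("EF", 4), ("GH", 5), ("IJK", 6),
   ("LMN", 7), ("OPQ", 8), ("RST", 9), ("UVW", 10), ("XYZ", 11)]

-- the 'for k, v in trans_map.items(): if starting_letter in k.lower(): return ...' loop
def pvALoop (sl : List Char) : List (String × Int) → Option String
  | [] => none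
  | (k, v) :: rest =>
    if PySem.Chars.isIn sl (PySem.Chars.lower k.toList) then
      some (String.ofList (['1', ','] ++ PySem.Int.toChars v))   -- '1,{}'.format(v)
    else pvALoop sl rest

def get_tagid_py (userid : String) : Option String :=
  match userid.toList with
  | [] => none          -- unreachable under Pre_: userid[0] raises IndexError
  | c :: _ => pvALoop (PySem.Chars.lower [c]) pvTransMap

-- ===== PORT B =====
-- _TABLE = {ch: v for group, v in _GROUPS for ch in group.lower()} (built once)
def pvFlatTable : PySem.Dict Char Int :=
  pvTransMap.foldl
    (fun d gv => (PySem.Chars.lower gv.1.toList).foldl (fun d ch => d.insert ch gv.2) d)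
    PySem.Dict.empty

def get_tagid_py_alt (userid : String) : Option String :=
  match userid.toList with
  | [] => none          -- unreachable under Pre_: userid[0] raises IndexError
  | c :: _ =>
    match pvFlatTable.get? (PySem.Chars.lowerChar c) with
    | none => none
    | some v => some (String.ofList (['1', ','] ++ PySem.Int.toChars v))

-- ===== PRECONDITION & SPEC =====
-- Pre_ excludes only the empty string, on which A raises IndexError at userid[0].
def Pre_get_tagid_py (userid : String) : Prop := userid ≠ ""
instance (userid : String) : Decidable (Pre_get_tagid_py userid) := by unfold Pre_get_tagid_py; infer_instance
def pvWitness_get_tagid_py : String := "alice"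

def Spec_get_tagid_py (userid : String) (out : Option String) : Prop := out = get_tagid_py_alt userid
instance (userid : String) (out : Option String) : Decidable (Spec_get_tagid_py userid out) := by unfold Spec_get_tagid_py; infer_instance

-- ===== CLAIM (what is proved, stated in full; the proofs are below) =====
def Claim_equal_get_tagid_py : Prop := ∀ (userid : String), Dom_get_tagid_py userid → Pre_get_tagid_py userid → Spec_get_tagid_py userid (get_tagid_py userid)

-- ===== LEMMAS AND PROOFS =====

-- both results depend only on the first character; for every ASCII char they agree
theorem pv_core_eq (c : Char) (h : c.toNat < 128) :
    pvALoop (PySem.Chars.lower [c]) pvTransMap =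
      (match pvFlatTable.get? (PySem.Chars.lowerChar c) with
       | none => none
       | some v => some (String.ofList (['1', ','] ++ PySem.Int.toChars v))) := by
  have hall : ∀ n : Fin 128,
      pvALoop (PySem.Chars.lower [Char.ofNat n.val]) pvTransMap =
        (match pvFlatTable.get? (PySem.Chars.lowerChar (Char.ofNat n.val)) with
         | none => none
         | some v => some (String.ofList (['1', ','] ++ PySem.Int.toChars v))) := by
    set_option maxRecDepth 4096 in decide
  have := hall ⟨c.toNat, h⟩
  simpa [Char.ofNat_toNat] using this

-- ===== VERDICT (by name: the statement is the Claim_ definition above) =====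
theorem get_tagid_py_spec : Claim_equal_get_tagid_py := by
  intro userid hdom hpre
  unfold Spec_get_tagid_py get_tagid_py get_tagid_py_alt
  cases hl : userid.toList with
  | nil => exact absurd (String.toList_eq_nil_iff.mp hl) hpre
  | cons c rest =>
    have hc : pvDomChar c = true := by
      have := (List.all_eq_true.mp hdom) c (by rw [hl]; exact List.mem_cons_self)
      exact this
    have h128 : c.toNat < 128 := by
      simp [pvDomChar] at hc
      omega
    simpa using pv_core_eq c h128
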